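-- pv_equiv track=rewrite | github.com/darrenangle/abide | src/abide/inference/analyzer.py | _detect_repeating_pattern
-- ===== SOURCE A (Python) =====
-- def _detect_repeating_pattern(values: list[int]) -> list[int] | None:
--     """Detect if a list contains a repeating pattern."""
--     if len(values) < 2:
--         return None
--
--     for pattern_len in range(1, len(values) // 2 + 1):
--         pattern = values[:pattern_len]
--         matches = True
--         for i in range(len(values)):
--             if values[i] != pattern[i % pattern_len]:
--                 matches = False
--                 break
--         if matches:
--             return pattern
--
--     return None
-- ===== SOURCE B (Python) =====
-- def _detect_repeating_pattern(values: list[int]) -> list[int] | None: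
--     """Detect if a list contains a repeating pattern (KMP failure function)."""
--     n = len(values)
--     if n < 2:
--         return None
--     fail = [0] * n
--     k = 0
--     for i in range(1, n):
--         while k and values[i] != values[k]:
--             k = fail[k - 1]
--         if values[i] == values[k]:
--             k += 1
--         fail[i] = k
--     period = n - fail[n - 1]
--     if 2 * period <= n:
--         return values[:period]
--     return None
-- ===== Notes on version B (the rewrite author's own statement) =====
-- stated objective: faster
-- what changed: Replaced A's brute-force scan that re-tests every candidate pattern length against the whole list with a single KMP failure-function pass: the smallest repeating prefix length is n minus the longest proper border, returned if it is at most n//2.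
import Mathlib
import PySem

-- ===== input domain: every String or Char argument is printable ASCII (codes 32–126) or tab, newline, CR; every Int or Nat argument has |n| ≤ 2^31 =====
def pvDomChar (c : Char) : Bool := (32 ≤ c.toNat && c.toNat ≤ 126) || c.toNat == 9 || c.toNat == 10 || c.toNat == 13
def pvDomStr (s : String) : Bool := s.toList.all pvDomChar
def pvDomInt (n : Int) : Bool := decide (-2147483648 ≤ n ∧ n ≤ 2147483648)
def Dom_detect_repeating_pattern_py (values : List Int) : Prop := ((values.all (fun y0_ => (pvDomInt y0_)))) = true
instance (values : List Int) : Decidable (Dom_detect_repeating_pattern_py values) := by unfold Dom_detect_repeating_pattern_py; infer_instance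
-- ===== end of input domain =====

-- B replaces A's quadratic scan over all candidate pattern lengths by a single KMP
-- failure-function pass: the smallest period is n minus the longest border.

-- ===== PORT A =====
-- inner loop: `for i in range(len(values)): if values[i] != pattern[i % pattern_len]: matches = False; break`
def aMatches (values pattern : List Int) (pl : Nat) : List Nat → Bool
  | [] => true
  | i :: rest =>
    if values.getD i 0 ≠ pattern.getD (i % pl) 0 then false
    else aMatches values pattern pl rest

-- outer loop: `for pattern_len in range(1, len(values) // 2 + 1): … if matches: return pattern`
def aLoop (values : List Int) (n : Nat) : List Nat → Option (List Int)
  | [] => none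
  | pl :: rest =>
    let pattern := values.take pl
    if aMatches values pattern pl (List.range n) then some pattern
    else aLoop values n rest

def detect_repeating_pattern_py (values : List Int) : Option (List Int) :=
  if values.length < 2 then none
  else aLoop values values.length (List.range' 1 (values.length / 2))

-- ===== PORT B =====
-- `while k and values[i] != values[k]: k = fail[k - 1]`; the fuel argument (started at k,
-- which strictly bounds the number of iterations) only makes the loop total.
def kmpWhile (values : List Int) (fail : List Nat) (c : Int) : Nat → Nat → Nat
  | 0, k => k
  | fuel + 1, k =>
    if k ≠ 0 ∧ c ≠ values.getD k 0 then
      kmpWhile values fail c fuel (fail.getD (k - 1) 0)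
    else k

-- `for i in range(1, n): … fail[i] = k` (fail is built by appending, index i is the next slot)
def kmpLoop (values : List Int) : List Nat → List Nat → Nat → List Nat
  | [], fail, _ => fail
  | i :: rest, fail, k =>
    let k1 := kmpWhile values fail (values.getD i 0) k k
    let k2 := if values.getD i 0 = values.getD k1 0 then k1 + 1 else k1
    kmpLoop values rest (fail ++ [k2]) k2

def detect_repeating_pattern_py_alt (values : List Int) : Option (List Int) :=
  let n := values.length
  if n < 2 then none
  else
    let fail := kmpLoop values (List.range' 1 (n - 1)) [0] 0
    let period := n - fail.getD (n - 1) 0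
    if 2 * period ≤ n then some (values.take period) else none

-- ===== PRECONDITION & SPEC =====
def Spec_detect_repeating_pattern_py (values : List Int) (out : Option (List Int)) : Prop := out = detect_repeating_pattern_py_alt values
instance (values : List Int) (out : Option (List Int)) : Decidable (Spec_detect_repeating_pattern_py values out) := by unfold Spec_detect_repeating_pattern_py; infer_instance

-- ===== CLAIM (what is proved, stated in full; the proofs are below) =====
def Claim_equal_detect_repeating_pattern_py : Prop := ∀ (values : List Int), Dom_detect_repeating_pattern_py values → Spec_detect_repeating_pattern_py values (detect_repeating_pattern_py values)

-- ===== LEMMAS AND PROOFS =====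

-- `b` is a (proper) border of the prefix of length `m` of `xs`
def Border (xs : List Int) (m b : Nat) : Prop :=
  b < m ∧ ∀ j < b, xs.getD j 0 = xs.getD (m - b + j) 0

def borderDec (xs : List Int) (m b : Nat) : Decidable (Border xs m b) := by
  unfold Border; infer_instance

-- length of the longest proper border of the prefix of length m
def lb (xs : List Int) (m : Nat) : Nat := @Nat.findGreatest (Border xs m) (borderDec xs m) m

theorem border_zero (xs : List Int) (m : Nat) (hm : 0 < m) : Border xs m 0 :=
  ⟨hm, fun j hj => absurd hj (Nat.not_lt_zero j)⟩

theorem lb_border (xs : List Int) (m : Nat) (hm : 0 < m) : Border xs m (lb xs m) :=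
  @Nat.findGreatest_spec 0 (Border xs m) (borderDec xs m) m (Nat.zero_le m) (border_zero xs m hm)

theorem lb_lt (xs : List Int) (m : Nat) (hm : 0 < m) : lb xs m < m :=
  (lb_border xs m hm).1

theorem border_le_lb (xs : List Int) (m b : Nat) (h : Border xs m b) : b ≤ lb xs m :=
  @Nat.le_findGreatest b (Border xs m) (borderDec xs m) m (Nat.le_of_lt h.1) h

theorem border_trans (xs : List Int) (m b c : Nat) (h1 : Border xs m b) (h2 : Border xs b c) :
    Border xs m c := by
  obtain ⟨hbm, h1⟩ := h1
  obtain ⟨hcb, h2⟩ := h2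
  refine ⟨Nat.lt_trans hcb hbm, fun j hj => ?_⟩
  have e1 : xs.getD j 0 = xs.getD (b - c + j) 0 := h2 j hj
  have hlt : b - c + j < b := by omega
  have e2 : xs.getD (b - c + j) 0 = xs.getD (m - b + (b - c + j)) 0 := h1 _ hlt
  have : m - b + (b - c + j) = m - c + j := by omega
  rw [e1, e2, this]

theorem border_nest (xs : List Int) (m b k : Nat) (hb : Border xs m b) (hk : Border xs m k)
    (hlt : b < k) : Border xs k b := by
  obtain ⟨hbm, hb2⟩ := hb
  obtain ⟨hkm, hk2⟩ := hk
  refine ⟨hlt, fun j hj => ?_⟩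
  have e1 : xs.getD j 0 = xs.getD (m - b + j) 0 := hb2 j hj
  have hlt2 : k - b + j < k := by omega
  have e2 : xs.getD (k - b + j) 0 = xs.getD (m - k + (k - b + j)) 0 := hk2 _ hlt2
  have : m - k + (k - b + j) = m - b + j := by omega
  rw [e2, this, ← e1]

theorem border_succ (xs : List Int) (m b : Nat) :
    Border xs (m + 1) (b + 1) ↔ (Border xs m b ∧ xs.getD b 0 = xs.getD m 0) := by
  constructor
  · rintro ⟨hlt, h⟩
    have hbm : b < m := by omega
    refine ⟨⟨hbm, fun j hj => ?_⟩, ?_⟩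
    · have := h j (by omega)
      have e : m + 1 - (b + 1) + j = m - b + j := by omega
      rwa [e] at this
    · have := h b (by omega)
      have e : m + 1 - (b + 1) + b = m := by omega
      rwa [e] at this
  · rintro ⟨⟨hbm, h⟩, he⟩
    refine ⟨by omega, fun j hj => ?_⟩
    have e : m + 1 - (b + 1) + j = m - b + j := by omega
    rw [e]
    rcases Nat.lt_or_ge j b with hjb | hjb
    · exact h j hjb
    · have hjb' : j = b := by omega
      rw [hjb']
      have : m - b + b = m := by omega
      rw [this]; exact he

theorem kmpWhile_spec (xs : List Int) (fail : List Nat) (c : Int) (m : Nat)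
    (hfail : ∀ j < m, fail.getD j 0 = lb xs (j + 1)) :
    ∀ fuel k, k ≤ fuel → Border xs m k →
      (∀ b, Border xs m b → xs.getD b 0 = c → b ≤ k) →
      (Border xs m (kmpWhile xs fail c fuel k) ∧
       (∀ b, Border xs m b → xs.getD b 0 = c → b ≤ kmpWhile xs fail c fuel k) ∧
       (kmpWhile xs fail c fuel k = 0 ∨ xs.getD (kmpWhile xs fail c fuel k) 0 = c)) := by
  intro fuel
  induction fuel with
  | zero =>
    intro k hk hB hH
    have : k = 0 := Nat.le_zero.mp hk
    subst this
    exact ⟨hB, hH, Or.inl rfl⟩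
  | succ f ih =>
    intro k hk hB hH
    by_cases h : k ≠ 0 ∧ c ≠ xs.getD k 0
    · have hstep : kmpWhile xs fail c (f + 1) k = kmpWhile xs fail c f (fail.getD (k - 1) 0) := by
        simp only [kmpWhile, if_pos h]
      rw [hstep]
      have hk0 : 0 < k := Nat.pos_of_ne_zero h.1
      have hkm : k < m := hB.1
      have hfk : fail.getD (k - 1) 0 = lb xs k := by
        have := hfail (k - 1) (by omega)
        rwa [Nat.sub_add_cancel hk0] at this
      rw [hfk]
      have hlbk : lb xs k < k := lb_lt xs k hk0
      refine ih (lb xs k) (by omega) ?_ ?_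
      · exact border_trans xs m k (lb xs k) hB (lb_border xs k hk0)
      · intro b hb hbc
        have hbk : b ≤ k := hH b hb hbc
        have hbne : b ≠ k := by
          intro he; subst he; exact h.2 hbc.symm
        have : b < k := by omega
        exact border_le_lb xs k b (border_nest xs m b k hb hB this)
    · have hstep : kmpWhile xs fail c (f + 1) k = k := by
        simp only [kmpWhile, if_neg h]
      rw [hstep]
      refine ⟨hB, hH, ?_⟩
      by_cases hk0 : k = 0
      · exact Or.inl hk0
      · right
        rcases Decidable.not_and_iff_or_not.mp h with h1 | h2
        · exact absurd hk0 (by simpa using h1)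
        · have := Decidable.not_not.mp h2
          exact this.symm
theorem kmpLoop_spec (xs : List Int) :
    ∀ (len m : Nat) (fail : List Nat) (k : Nat), 0 < m → fail.length = m →
      (∀ j < m, fail.getD j 0 = lb xs (j + 1)) → k = lb xs m →
      ((kmpLoop xs (List.range' m len) fail k).length = m + len ∧
       ∀ j < m + len, (kmpLoop xs (List.range' m len) fail k).getD j 0 = lb xs (j + 1)) := by
  intro len
  induction len with
  | zero =>
    intro m fail k hm hlen hfail hk
    simp only [List.range', kmpLoop]
    exact ⟨by omega, fun j hj => hfail j (by omega)⟩
  | succ l ih =>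
    intro m fail k hm hlen hfail hk
    have hr : List.range' m (l + 1) = m :: List.range' (m + 1) l := by
      simp [List.range']
    rw [hr]
    simp only [kmpLoop]
    set c := xs.getD m 0 with hc
    have hws := kmpWhile_spec xs fail c m hfail k k (Nat.le_refl k)
      (by rw [hk]; exact lb_border xs m hm)
      (by intro b hb _; rw [hk]; exact border_le_lb xs m b hb)
    set k1 := kmpWhile xs fail c k k with hk1
    obtain ⟨hB1, hH1, hexit⟩ := hws
    have hk2lb : (if c = xs.getD k1 0 then k1 + 1 else k1) = lb xs (m + 1) := by
      by_cases he : c = xs.getD k1 0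
      · rw [if_pos he]
        have hge : k1 + 1 ≤ lb xs (m + 1) := by
          apply border_le_lb
          exact (border_succ xs m k1).mpr ⟨hB1, he.symm⟩
        have hle : lb xs (m + 1) ≤ k1 + 1 := by
          have hb := lb_border xs (m + 1) (by omega)
          cases hL : lb xs (m + 1) with
          | zero => omega
          | succ b =>
            rw [hL] at hb
            obtain ⟨hbm, hbe⟩ := (border_succ xs m b).mp hb
            have := hH1 b hbm hbe
            omega
        omega
      · rw [if_neg he]
        have hk10 : k1 = 0 := by
          rcases hexit with h0 | hce
          · exact h0
          · exact absurd hce.symm he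
        have : lb xs (m + 1) = 0 := by
          by_contra hne
          have hb := lb_border xs (m + 1) (by omega)
          cases hL : lb xs (m + 1) with
          | zero => exact hne hL
          | succ b =>
            rw [hL] at hb
            obtain ⟨hbm, hbe⟩ := (border_succ xs m b).mp hb
            have hb0 : b = 0 := by
              have := hH1 b hbm hbe
              omega
            subst hb0
            rw [hk10] at he
            exact he hbe.symm
        omega
    set k2 := if c = xs.getD k1 0 then k1 + 1 else k1 with hk2def
    have hres := ih (m + 1) (fail ++ [k2]) k2 (by omega)
      (by simp [hlen])
      (by
        intro j hj
        rcases Nat.lt_or_ge j m with hjm | hjm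
        · have : (fail ++ [k2]).getD j 0 = fail.getD j 0 := by
            simp only [List.getD, List.getElem?_append_left (by omega : j < fail.length)]
          rw [this]; exact hfail j hjm
        · have hjeq : j = m := by omega
          subst hjeq
          have : (fail ++ [k2]).getD j 0 = k2 := by
            simp only [List.getD]
            rw [← hlen, List.getElem?_concat_length]
            rfl
          rw [this, hk2lb])
      hk2lb
    exact ⟨by rw [hres.1]; omega, fun j hj => hres.2 j (by omega)⟩

-- `values[i] = values[i % p]` for all i: A's tiling test
def Tiling (xs : List Int) (p : Nat) : Prop :=
  ∀ i < xs.length, xs.getD i 0 = xs.getD (i % p) 0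

def Period (xs : List Int) (p : Nat) : Prop :=
  ∀ i, p ≤ i → i < xs.length → xs.getD i 0 = xs.getD (i - p) 0

theorem getD_take (xs : List Int) (p j : Nat) (hj : j < p) :
    (xs.take p).getD j 0 = xs.getD j 0 := by
  simp [List.getD, hj]

theorem aMatches_iff (xs pat : List Int) (pl : Nat) (L : List Nat) :
    aMatches xs pat pl L = true ↔ ∀ i ∈ L, xs.getD i 0 = pat.getD (i % pl) 0 := by
  induction L with
  | nil => simp [aMatches]
  | cons i rest ih =>
    simp only [aMatches]
    by_cases h : xs.getD i 0 ≠ pat.getD (i % pl) 0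
    · rw [if_pos h]
      constructor
      · intro hf; exact absurd hf (by simp)
      · intro hall; exact absurd (hall i (by simp)) h
    · rw [if_neg h]
      have h' := Decidable.not_not.mp h
      rw [ih]
      constructor
      · intro ha j hj
        rcases List.mem_cons.mp hj with he | hj
        · rw [he]; exact h'
        · exact ha j hj
      · intro ha j hj; exact ha j (List.mem_cons_of_mem i hj)

theorem aMatches_tiling (xs : List Int) (pl : Nat) (hpl : 0 < pl) :
    (aMatches xs (xs.take pl) pl (List.range xs.length) = true) ↔ Tiling xs pl := by
  rw [aMatches_iff]
  constructor
  · intro h i hi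
    have := h i (List.mem_range.mpr hi)
    rwa [getD_take xs pl _ (Nat.mod_lt i hpl)] at this
  · intro h i hi
    have hi' := List.mem_range.mp hi
    rw [getD_take xs pl _ (Nat.mod_lt i hpl)]
    exact h i hi'

theorem tiling_iff_period (xs : List Int) (p : Nat) (hp : 0 < p) :
    Tiling xs p ↔ Period xs p := by
  constructor
  · intro h i hpi hi
    have e1 := h i hi
    have e2 := h (i - p) (by omega)
    have : (i - p) % p = i % p := by
      conv_rhs => rw [show i = (i - p) + p by omega]
      rw [Nat.add_mod_right]
    rw [this] at e2
    rw [e1, ← e2]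
  · intro h i
    induction i using Nat.strong_induction_on with
    | _ i ih =>
      intro hi
      rcases Nat.lt_or_ge i p with hip | hip
      · rw [Nat.mod_eq_of_lt hip]
      · have e1 := h i hip hi
        have e2 := ih (i - p) (by omega) (by omega)
        have : (i - p) % p = i % p := by
          conv_rhs => rw [show i = (i - p) + p by omega]
          rw [Nat.add_mod_right]
        rw [e1, e2, this]

theorem period_iff_border (xs : List Int) (p : Nat) (hp : 0 < p) (hpn : p ≤ xs.length) :
    Period xs p ↔ Border xs xs.length (xs.length - p) := by
  constructor
  · intro h
    refine ⟨by omega, fun j hj => ?_⟩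
    have := h (p + j) (by omega) (by omega)
    have e1 : p + j - p = j := by omega
    have e2 : xs.length - (xs.length - p) + j = p + j := by omega
    rw [e1] at this
    rw [e2, ← this]
  · intro h i hpi hi
    have := h.2 (i - p) (by omega)
    have e : xs.length - (xs.length - p) + (i - p) = i := by omega
    rw [e] at this
    exact this.symm

-- A's loop skips every candidate before the first match and returns at the first match
theorem aLoop_first (xs : List Int) (n : Nat) (p0 : Nat)
    (hT : aMatches xs (xs.take p0) p0 (List.range n) = true)
    (hS : ∀ q, 1 ≤ q → q < p0 → aMatches xs (xs.take q) q (List.range n) = false) :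
    ∀ len start, 1 ≤ start → start ≤ p0 → p0 < start + len →
      aLoop xs n (List.range' start len) = some (xs.take p0) := by
  intro len
  induction len with
  | zero => intro start _ _ h; omega
  | succ l ih =>
    intro start h1 h2 h3
    have hr : List.range' start (l + 1) = start :: List.range' (start + 1) l := by
      simp [List.range']
    rw [hr]
    simp only [aLoop]
    rcases Nat.lt_or_ge start p0 with hlt | hge
    · rw [hS start h1 hlt]
      simp only [Bool.false_eq_true, if_false]
      exact ih (start + 1) (by omega) (by omega) (by omega)
    · have : start = p0 := by omega
      subst this
      rw [hT]
      simp
theorem aLoop_none (xs : List Int) (n : Nat) :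
    ∀ L, (∀ q ∈ L, aMatches xs (xs.take q) q (List.range n) = false) →
      aLoop xs n L = none := by
  intro L
  induction L with
  | nil => simp [aLoop]
  | cons q rest ih =>
    intro h
    simp only [aLoop]
    rw [h q (List.mem_cons_self)]
    simp only [Bool.false_eq_true, if_false]
    exact ih (fun r hr => h r (List.mem_cons_of_mem q hr))

theorem lb_one (xs : List Int) : lb xs 1 = 0 := by
  have := lb_lt xs 1 Nat.one_pos
  omega

-- no period shorter than n - lb n
theorem period_min (xs : List Int) (p : Nat) (hp : 0 < p) (hpn : p ≤ xs.length)
    (h : Period xs p) : xs.length - lb xs xs.length ≤ p := by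
  have hb := (period_iff_border xs p hp hpn).mp h
  have := border_le_lb xs xs.length (xs.length - p) hb
  omega

theorem period_p0 (xs : List Int) (hn : 0 < xs.length) :
    Period xs (xs.length - lb xs xs.length) := by
  have hb := lb_border xs xs.length hn
  have hlt := lb_lt xs xs.length hn
  have h := (period_iff_border xs (xs.length - lb xs xs.length) (by omega) (by omega)).mpr
  apply h
  have e : xs.length - (xs.length - lb xs xs.length) = lb xs xs.length := by omega
  rw [e]
  exact hb

-- ===== VERDICT (by name: the statement is the Claim_ definition above) =====
theorem detect_repeating_pattern_py_spec : Claim_equal_detect_repeating_pattern_py := by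
  intro values _
  unfold Spec_detect_repeating_pattern_py
  unfold detect_repeating_pattern_py detect_repeating_pattern_py_alt
  set n := values.length with hn
  by_cases h2 : n < 2
  · simp [h2]
  · simp only [h2, if_false]
    have hn1 : 0 < n := by omega
    have hfail := kmpLoop_spec values (n - 1) 1 [0] 0 Nat.one_pos rfl
      (by
        intro j hj
        have : j = 0 := by omega
        subst this
        simp [lb_one])
      (lb_one values).symm
    have hlast : (kmpLoop values (List.range' 1 (n - 1)) [0] 0).getD (n - 1) 0 = lb values n := by
      have := hfail.2 (n - 1) (by omega)
      rwa [show n - 1 + 1 = n by omega] at this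
    rw [hlast]
    set L := lb values n with hL
    have hLlt : L < n := lb_lt values n hn1
    set p0 := n - L with hp0
    have hp00 : 0 < p0 := by omega
    have hPer : Period values p0 := period_p0 values hn1
    by_cases hcase : 2 * p0 ≤ n
    · rw [if_pos hcase]
      have hp0half : p0 ≤ n / 2 := by omega
      have hT : aMatches values (values.take p0) p0 (List.range n) = true := by
        rw [aMatches_tiling values p0 hp00]
        exact (tiling_iff_period values p0 hp00).mpr hPer
      have hS : ∀ q, 1 ≤ q → q < p0 →
          aMatches values (values.take q) q (List.range n) = false := by
        intro q h1 hq
        by_contra hne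
        have ht : aMatches values (values.take q) q (List.range n) = true := by
          cases hb : aMatches values (values.take q) q (List.range n)
          · exact absurd hb hne
          · rfl
        have hTil := (aMatches_tiling values q (by omega)).mp ht
        have hPq := (tiling_iff_period values q (by omega)).mp hTil
        have hmin := period_min values q (by omega) (by omega) hPq
        rw [← hn, ← hL, ← hp0] at hmin
        omega
      exact aLoop_first values n p0 hT hS (n / 2) 1 (Nat.le_refl 1) hp00 (by omega)
    · rw [if_neg hcase]
      apply aLoop_none
      intro q hq
      have hq' := List.mem_range'_1.mp hq
      by_contra hne
      have ht : aMatches values (values.take q) q (List.range n) = true := by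
        cases hb : aMatches values (values.take q) q (List.range n)
        · exact absurd hb hne
        · rfl
      have hTil := (aMatches_tiling values q (by omega)).mp ht
      have hPq := (tiling_iff_period values q (by omega)).mp hTil
      have hmin := period_min values q (by omega) (by omega) hPq
      rw [← hn, ← hL, ← hp0] at hmin
      have : 2 * (n / 2) ≤ n := by omega
      omega
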